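-- pv_equiv track=rewrite | github.com/github-roushan/LeetCodePractice | Python/problems/1493.py | getMaxContinous
-- ===== SOURCE A (Python) =====
-- def getMaxContinous(lis):
--     cont = [0]
--     c = 0
--     for el in lis:
--         if el == 0:c = 0
--         else:c += 1
--         cont.append(c)
--     return cont
-- ===== SOURCE B (Python) =====
-- def getMaxContinous(lis):
--     cont = [0]
--     i = 0
--     n = len(lis)
--     while i < n:
--         if lis[i] == 0:
--             cont.append(0)
--             i += 1
--         else:
--             j = i
--             while j < n and lis[j] != 0:
--                 j += 1
--             for k in range(1, j - i + 1):
--                 cont.append(k)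
--             i = j
--     return cont
-- ===== Notes on version B (the rewrite author's own statement) =====
-- stated objective: alternative
-- what changed: B replaces A's flat per-element counter scan with a run-based traversal: it locates each maximal nonzero run and emits 1..len(run) for it, appending a single 0 per zero element.
import Mathlib
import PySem

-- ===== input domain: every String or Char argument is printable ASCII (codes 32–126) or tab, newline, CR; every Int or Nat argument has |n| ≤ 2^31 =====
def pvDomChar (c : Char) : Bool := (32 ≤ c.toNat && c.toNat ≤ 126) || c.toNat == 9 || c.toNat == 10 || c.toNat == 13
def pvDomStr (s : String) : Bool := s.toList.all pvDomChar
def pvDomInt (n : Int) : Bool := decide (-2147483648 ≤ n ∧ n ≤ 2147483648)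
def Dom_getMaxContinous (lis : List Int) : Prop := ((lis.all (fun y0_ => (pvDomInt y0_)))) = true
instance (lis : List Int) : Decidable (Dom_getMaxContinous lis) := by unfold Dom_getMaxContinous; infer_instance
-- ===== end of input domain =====

-- B replaces A's flat per-element counter scan with a run-based traversal (alternative decomposition, same O(n) cost).


-- ===== PORT A =====
-- for el in lis: reset-or-increment the counter, append it; state = (cont, c)
def getMaxContinous (lis : List Int) : List Int :=
  (lis.foldl (fun (s : List Int × Int) el =>
      let c := if el = 0 then 0 else s.2 + 1
      (s.1 ++ [c], c)) ([0], 0)).1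

-- ===== PORT B =====
-- inner while loop of B: split off the maximal leading nonzero run (its length, the remainder)
def pvNzRun (l : List Int) : Nat × List Int :=
  match l with
  | [] => (0, [])
  | x :: rest => if x = 0 then (0, x :: rest) else
      let p := pvNzRun rest
      (p.1 + 1, p.2)

theorem pvNzRun_len (l : List Int) : (pvNzRun l).2.length ≤ l.length := by
  induction l with
  | nil => simp [pvNzRun]
  | cons x rest ih =>
      simp only [pvNzRun]
      split
      · simp
      · simpa using Nat.le_succ_of_le ih

-- for k in range(1, j-i+1): the counts 1..k emitted for one run
def pvFill (k : Nat) : List Int := (List.range k).map (fun i : Nat => (i : Int) + 1)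

-- outer while loop of B: one zero → append 0; nonzero run → append 1..len, continue after it
def pvRuns (l : List Int) : List Int :=
  match l with
  | [] => []
  | x :: rest =>
      if x = 0 then 0 :: pvRuns rest
      else
        let p := pvNzRun rest
        pvFill (p.1 + 1) ++ pvRuns p.2
termination_by l.length
decreasing_by
  · simp
  · simpa using Nat.lt_succ_of_le (pvNzRun_len rest)

def getMaxContinous_alt (lis : List Int) : List Int := 0 :: pvRuns lis

-- ===== PRECONDITION & SPEC =====
def Spec_getMaxContinous (lis : List Int) (out : List Int) : Prop := out = getMaxContinous_alt lis
instance (lis : List Int) (out : List Int) : Decidable (Spec_getMaxContinous lis out) := by unfold Spec_getMaxContinous; infer_instance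

-- ===== CLAIM (what is proved, stated in full; the proofs are below) =====
def Claim_equal_getMaxContinous : Prop := ∀ (lis : List Int), Dom_getMaxContinous lis → Spec_getMaxContinous lis (getMaxContinous lis)

-- ===== LEMMAS AND PROOFS =====

-- the sequence of counter values A appends, starting from counter c
def pvCnt (c : Int) : List Int → List Int
  | [] => []
  | x :: rest =>
      let c' := if x = 0 then 0 else c + 1
      c' :: pvCnt c' rest

theorem foldA (l : List Int) (acc : List Int) (c : Int) :
    (l.foldl (fun (s : List Int × Int) el =>
      let c := if el = 0 then 0 else s.2 + 1
      (s.1 ++ [c], c)) (acc, c)).1 = acc ++ pvCnt c l := by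
  induction l generalizing acc c with
  | nil => simp [pvCnt]
  | cons x rest ih => simp [pvCnt, ih]

-- counts starting from c over l: first fillFrom for the leading nonzero run, then the rest
def pvFillFrom (c : Int) (k : Nat) : List Int := (List.range k).map (fun i : Nat => c + (i : Int) + 1)

theorem fillFrom_zero (k : Nat) : pvFillFrom 0 k = pvFill k := by
  simp [pvFillFrom, pvFill]

theorem fillFrom_succ (c : Int) (k : Nat) :
    pvFillFrom c (k + 1) = (c + 1) :: pvFillFrom (c + 1) k := by
  rw [pvFillFrom, List.range_succ_eq_map, List.map_cons, List.map_map, pvFillFrom]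
  refine congrArg₂ _ (by push_cast; ring) ?_
  apply List.map_congr_left
  intro i _
  simp only [Function.comp]
  push_cast
  ring

theorem runs_eq_fill (l : List Int) :
    pvRuns l = pvFillFrom 0 (pvNzRun l).1 ++ pvRuns (pvNzRun l).2 := by
  match l with
  | [] => simp [pvRuns, pvNzRun, pvFillFrom]
  | x :: rest =>
      by_cases hx : x = 0
      · simp [pvRuns, pvNzRun, hx, pvFillFrom]
      · simp [pvRuns, pvNzRun, hx, fillFrom_zero]

theorem cnt_eq (l : List Int) : ∀ c : Int,
    pvCnt c l = pvFillFrom c (pvNzRun l).1 ++ pvRuns (pvNzRun l).2 := by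
  induction l with
  | nil => intro c; simp [pvCnt, pvNzRun, pvFillFrom, pvRuns]
  | cons x rest ih =>
      intro c
      by_cases hx : x = 0
      · have h0 : pvCnt 0 rest = pvRuns rest := by
          rw [ih 0, ← runs_eq_fill]
        simp [pvCnt, pvNzRun, hx, pvFillFrom, pvRuns, h0]
      · simp only [pvCnt, pvNzRun, if_neg hx]
        rw [ih (c + 1), fillFrom_succ]
        simp

theorem cnt_zero_eq_runs (l : List Int) : pvCnt 0 l = pvRuns l := by
  rw [cnt_eq l 0, ← runs_eq_fill]

-- ===== VERDICT (by name: the statement is the Claim_ definition above) =====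
theorem getMaxContinous_spec : Claim_equal_getMaxContinous := by
  intro lis _
  show _ = _
  unfold getMaxContinous getMaxContinous_alt
  rw [foldA, cnt_zero_eq_runs]
  rfl
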